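-- pv_equiv track=rewrite | github.com/gotisgreat/data | k.py | mineu
-- ===== SOURCE A (Python) =====
-- def mineu(eu):
-- 	pos=eu[0][0]
-- 	value=eu[0][1]
-- 	for  i in range(len(eu)):
-- 		if value>eu[i][1]:
-- 			pos=eu[i][0]
-- 			value=eu[i][1]
-- 	return [pos,value]
-- ===== SOURCE B (Python) =====
-- def mineu(eu):
--     s = sorted(eu, key=lambda e: e[1])
--     return [s[0][0], s[0][1]]
-- ===== Notes on version B (the rewrite author's own statement) =====
-- stated objective: alternative
-- what changed: Replaces the explicit index loop tracking a running (pos,value) minimum with a stable sort by the second field and taking the first element of the sorted order (stability preserves the first-occurrence tie behaviour).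
import Mathlib
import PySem

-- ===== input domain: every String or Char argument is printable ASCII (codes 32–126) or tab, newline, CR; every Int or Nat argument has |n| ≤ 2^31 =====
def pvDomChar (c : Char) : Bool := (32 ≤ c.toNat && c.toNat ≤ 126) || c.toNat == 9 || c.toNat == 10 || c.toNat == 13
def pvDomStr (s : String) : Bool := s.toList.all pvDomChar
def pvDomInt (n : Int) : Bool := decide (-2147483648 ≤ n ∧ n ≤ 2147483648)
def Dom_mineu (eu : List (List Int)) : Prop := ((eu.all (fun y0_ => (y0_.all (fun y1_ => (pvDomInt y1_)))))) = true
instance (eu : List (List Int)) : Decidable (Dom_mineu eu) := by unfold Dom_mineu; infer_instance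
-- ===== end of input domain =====

-- B replaces A's index loop over a running (pos,value) minimum by a stable sort on the
-- second field followed by taking the first sorted element (alternative decomposition, not faster).

-- ===== PORT A =====
-- A: pos=eu[0][0]; value=eu[0][1]; for i in range(len(eu)): if value>eu[i][1]: update; return [pos,value]
def mineu (eu : List (List Int)) : List Int :=
  let pos := PySem.List.pyGetD (PySem.List.pyGetD eu 0 []) 0 0
  let value := PySem.List.pyGetD (PySem.List.pyGetD eu 0 []) 1 0
  let st := (PySem.List.pyRange 0 (eu.length : Int) 1).foldl
    (fun (s : Int × Int) i =>
      if s.2 > PySem.List.pyGetD (PySem.List.pyGetD eu i []) 1 0 then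
        (PySem.List.pyGetD (PySem.List.pyGetD eu i []) 0 0,
         PySem.List.pyGetD (PySem.List.pyGetD eu i []) 1 0)
      else s)
    (pos, value)
  [st.1, st.2]

-- ===== PORT B =====
-- B: s = sorted(eu, key=lambda e: e[1]); return [s[0][0], s[0][1]]
def mineu_alt (eu : List (List Int)) : List Int :=
  let s := PySem.List.sorted eu (fun e => PySem.List.pyGetD e 1 0) false
  [PySem.List.pyGetD (PySem.List.pyGetD s 0 []) 0 0,
   PySem.List.pyGetD (PySem.List.pyGetD s 0 []) 1 0]

-- ===== PRECONDITION & SPEC =====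
-- Pre_ excludes exactly the inputs where Python A raises IndexError: the empty list (eu[0])
-- and lists containing a row with fewer than two entries (eu[i][1]).
def Pre_mineu (eu : List (List Int)) : Prop := eu ≠ [] ∧ ∀ r ∈ eu, 2 ≤ r.length
instance (eu : List (List Int)) : Decidable (Pre_mineu eu) := by unfold Pre_mineu; infer_instance
def pvWitness_mineu : List (List Int) := [[3, 2], [1, 1], [5, 1]]

def Spec_mineu (eu : List (List Int)) (out : List Int) : Prop := out = mineu_alt eu
instance (eu : List (List Int)) (out : List Int) : Decidable (Spec_mineu eu out) := by unfold Spec_mineu; infer_instance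

-- ===== CLAIM (what is proved, stated in full; the proofs are below) =====
def Claim_equal_mineu : Prop := ∀ (eu : List (List Int)), Dom_mineu eu → Pre_mineu eu → Spec_mineu eu (mineu eu)

-- ===== LEMMAS AND PROOFS =====

-- the common characterisation: first element of eu with minimal second field (ties keep the earlier)
def pvFirstMin (h : List Int) (t : List (List Int)) : List Int :=
  t.foldl (fun m r =>
    if PySem.List.pyGetD r 1 0 < PySem.List.pyGetD m 1 0 then r else m) h

lemma head?_foldl_insertBy {α : Type} (before : α → α → Bool) :
    ∀ (t : List α) (y : α) (ys : List α),
      (t.foldl (fun acc x => PySem.List.insertBy before x acc) (y :: ys)).head? =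
        some (t.foldl (fun m r => if before r m then r else m) y) := by
  intro t
  induction t with
  | nil => intro y ys; simp
  | cons r t ih =>
    intro y ys
    simp only [List.foldl_cons]
    cases h : before r y
    · have : PySem.List.insertBy before r (y :: ys) = y :: PySem.List.insertBy before r ys := by
        simp [PySem.List.insertBy, h]
      rw [this, ih]; simp
    · have : PySem.List.insertBy before r (y :: ys) = r :: y :: ys := by
        simp [PySem.List.insertBy, h]
      rw [this, ih]; simp

-- head of B's stable sort = first minimal element
lemma head?_sorted (h : List Int) (t : List (List Int)) :
    (PySem.List.sorted (h :: t) (fun e => PySem.List.pyGetD e 1 0) false).head? =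
      some (pvFirstMin h t) := by
  simp only [PySem.List.sorted, Bool.false_eq_true, if_false, List.foldl_cons]
  have h1 : PySem.List.insertBy
      (fun a b => decide (PySem.List.pyGetD a 1 0 < PySem.List.pyGetD b 1 0)) h [] = [h] := by
    simp [PySem.List.insertBy]
  rw [h1, head?_foldl_insertBy]
  simp [pvFirstMin]

-- A's loop state is always (m[0], m[1]) for the running first-min m
lemma foldl_A_eq (t : List (List Int)) :
    ∀ (m : List Int),
      (t.foldl (fun (s : Int × Int) row =>
          if s.2 > PySem.List.pyGetD row 1 0 then
            (PySem.List.pyGetD row 0 0, PySem.List.pyGetD row 1 0)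
          else s)
        (PySem.List.pyGetD m 0 0, PySem.List.pyGetD m 1 0)) =
      (PySem.List.pyGetD (pvFirstMin m t) 0 0, PySem.List.pyGetD (pvFirstMin m t) 1 0) := by
  induction t with
  | nil => intro m; simp [pvFirstMin]
  | cons r t ih =>
    intro m
    simp only [List.foldl_cons, pvFirstMin] at *
    by_cases hlt : PySem.List.pyGetD r 1 0 < PySem.List.pyGetD m 1 0
    · rw [if_pos (by exact_mod_cast hlt), if_pos hlt, ih r]
    · rw [if_neg (by exact_mod_cast hlt), if_neg hlt, ih m]

-- ===== VERDICT (by name: the statement is the Claim_ definition above) =====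
theorem mineu_spec : Claim_equal_mineu := by
  intro eu _ hpre
  obtain ⟨hne, -⟩ := hpre
  obtain ⟨h, t, rfl⟩ := List.exists_cons_of_ne_nil hne
  show mineu (h :: t) = mineu_alt (h :: t)
  -- A side: turn the index loop into a fold over the list, peel the no-op first step
  have hA : mineu (h :: t) =
      [(PySem.List.pyGetD (pvFirstMin h t) 0 0), (PySem.List.pyGetD (pvFirstMin h t) 1 0)] := by
    unfold mineu
    simp only []
    rw [PySem.List.foldl_pyRange_zero_pyGetD' (h :: t) []
      (fun (s : Int × Int) row =>
        if s.2 > PySem.List.pyGetD row 1 0 then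
          (PySem.List.pyGetD row 0 0, PySem.List.pyGetD row 1 0)
        else s)]
    simp only [List.foldl_cons, PySem.List.pyGetD_zero_cons]
    rw [if_neg (lt_irrefl _), foldl_A_eq]
  -- B side: head of the stable sort is the first minimum
  have hB : mineu_alt (h :: t) =
      [(PySem.List.pyGetD (pvFirstMin h t) 0 0), (PySem.List.pyGetD (pvFirstMin h t) 1 0)] := by
    unfold mineu_alt
    have hs := head?_sorted h t
    obtain ⟨s0, s', hs'⟩ :
        ∃ s0 s', PySem.List.sorted (h :: t) (fun e => PySem.List.pyGetD e 1 0) false = s0 :: s' := by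
      cases hss : PySem.List.sorted (h :: t) (fun e => PySem.List.pyGetD e 1 0) false with
      | nil => rw [hss] at hs; simp at hs
      | cons a b => exact ⟨a, b, rfl⟩
    rw [hs'] at hs ⊢
    simp only [List.head?_cons, Option.some.injEq] at hs
    simp [hs]
  rw [hA, hB]
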